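-- pv_equiv track=rewrite | github.com/marina04-dev/Python | Practise/Book/Activities/Unit 5/Activity 5.py | swap_boolean_by_counting
-- ===== SOURCE A (Python) =====
-- def count_true_values(booleanList):
--     true_values = 0
--     for item in booleanList:
--         if item:
--             true_values = true_values + 1
--     return true_values
--
-- def swap_boolean_by_counting(List):
--     N = len(List)
--     true_values = count_true_values(List)
--     for i in range(true_values):
--         List[i] = True
--     for i in range(true_values, N):
--         List[i] = False
--     return List
-- ===== SOURCE B (Python) =====
-- def swap_boolean_by_counting(List):
--     # Stable partition: keep the truthy elements (as True) first, falsy (as False) after.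
--     List[:] = [bool(x) for x in List if x] + [bool(x) for x in List if not x]
--     return List
-- ===== Notes on version B (the rewrite author's own statement) =====
-- stated objective: simpler
-- what changed: B drops the counting helper and the two index-writing loops: it builds the result as a partition (filter of trues concatenated with filter of falses) assigned back in one slice assignment.
import Mathlib
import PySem

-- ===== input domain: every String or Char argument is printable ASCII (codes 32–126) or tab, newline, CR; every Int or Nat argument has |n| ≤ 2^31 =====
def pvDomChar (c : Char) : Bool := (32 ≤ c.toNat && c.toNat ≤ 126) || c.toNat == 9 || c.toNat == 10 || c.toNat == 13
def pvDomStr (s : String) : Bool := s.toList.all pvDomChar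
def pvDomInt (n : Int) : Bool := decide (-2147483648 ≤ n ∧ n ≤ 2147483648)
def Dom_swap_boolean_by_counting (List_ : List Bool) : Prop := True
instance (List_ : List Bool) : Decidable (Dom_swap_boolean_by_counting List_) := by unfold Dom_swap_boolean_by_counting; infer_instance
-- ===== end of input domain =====

-- B replaces the counting helper and the two index-writing loops by a stable partition
-- (trues filtered first, then falses) assigned back in place; equivalence is about the
-- return value (both Pythons mutate the argument list to the same final contents).

-- ===== PORT A =====
def count_true_values (booleanList : List Bool) : Nat :=
  booleanList.foldl (fun acc item => if item then acc + 1 else acc) 0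

def swap_boolean_by_counting (List_ : List Bool) : List Bool :=
  let N := List_.length
  let t := count_true_values List_
  -- for i in range(true_values): List[i] = True   (indices are nonnegative Nats)
  let L1 := (List.range t).foldl (fun L i => L.set i true) List_
  -- for i in range(true_values, N): List[i] = False
  (List.range' t (N - t)).foldl (fun L i => L.set i false) L1

-- ===== PORT B =====
def swap_boolean_by_counting_alt (List_ : List Bool) : List Bool :=
  (List_.filter (fun x => x)) ++ (List_.filter (fun x => !x))

-- ===== PRECONDITION & SPEC =====
def Spec_swap_boolean_by_counting (List_ : List Bool) (out : List Bool) : Prop := out = swap_boolean_by_counting_alt List_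
instance (List_ : List Bool) (out : List Bool) : Decidable (Spec_swap_boolean_by_counting List_ out) := by unfold Spec_swap_boolean_by_counting; infer_instance

-- ===== CLAIM (what is proved, stated in full; the proofs are below) =====
def Claim_equal_swap_boolean_by_counting : Prop := ∀ (List_ : List Bool), Dom_swap_boolean_by_counting List_ → Spec_swap_boolean_by_counting List_ (swap_boolean_by_counting List_)

-- ===== LEMMAS AND PROOFS =====

theorem foldl_set_length (r : List Nat) (v : Bool) (L : List Bool) :
    (r.foldl (fun L i => L.set i v) L).length = L.length := by
  induction r generalizing L with
  | nil => rfl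
  | cons a r ih => simp [List.foldl, ih]

theorem foldl_set_range'_getElem (k : Nat) : ∀ (a : Nat) (v : Bool) (L : List Bool) (i : Nat)
    (hi : i < L.length),
    ((List.range' a k).foldl (fun L i => L.set i v) L)[i]'(by
        rw [foldl_set_length]; exact hi) =
      if a ≤ i ∧ i < a + k then v else L[i] := by
  induction k with
  | zero => intro a v L i hi; simp
  | succ k ih =>
    intro a v L i hi
    rw [List.range'_succ]
    simp only [List.foldl_cons]
    rw [ih (a + 1) v (L.set a v) i (by simpa using hi)]
    rw [List.getElem_set]
    split_ifs with h1 h2 h3 h4 <;> first | rfl | omega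

theorem count_eq (l : List Bool) : ∀ n : Nat,
    l.foldl (fun acc item => if item then acc + 1 else acc) n
      = n + (l.filter (fun x => x)).length := by
  induction l with
  | nil => intro n; simp
  | cons a l ih =>
    intro n
    cases a <;> simp [List.foldl, ih] <;> omega

theorem filterT (l : List Bool) :
    l.filter (fun x => x) = List.replicate (l.filter (fun x => x)).length true := by
  apply List.eq_replicate_of_mem
  intro b hb
  have := List.of_mem_filter hb
  simpa using this

theorem filterF (l : List Bool) :
    l.filter (fun x => !x) = List.replicate (l.filter (fun x => !x)).length false := by
  apply List.eq_replicate_of_mem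
  intro b hb
  have := List.of_mem_filter hb
  simpa using this

theorem lens (l : List Bool) :
    (l.filter (fun x => x)).length + (l.filter (fun x => !x)).length = l.length := by
  induction l with
  | nil => rfl
  | cons a l ih => cases a <;> simp [List.filter] <;> omega

theorem swap_boolean_by_counting_spec : Claim_equal_swap_boolean_by_counting := by
  intro List_ _
  unfold Spec_swap_boolean_by_counting swap_boolean_by_counting swap_boolean_by_counting_alt
  simp only []
  set t := count_true_values List_ with ht
  have htval : t = (List_.filter (fun x => x)).length := by
    rw [ht]; simpa using count_eq List_ 0
  have htle : t ≤ List_.length := by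
    rw [htval]; exact List.length_filter_le _ _
  have hf : (List_.filter (fun x => !x)).length = List_.length - t := by
    have := lens List_; omega
  rw [filterT List_, filterF List_, ← htval, hf]
  apply List.ext_getElem
  · rw [foldl_set_length, foldl_set_length]; simp; omega
  · intro i h1 h2
    have hiL : i < List_.length := by
      have := h1; rw [foldl_set_length, foldl_set_length] at this; exact this
    rw [foldl_set_range'_getElem]
    · simp only [List.range_eq_range']
      rw [foldl_set_range'_getElem _ _ _ _ i hiL]
      rcases Nat.lt_or_ge i t with hit | hit
      · have : ¬ (t ≤ i ∧ i < t + (List_.length - t)) := by omega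
        rw [if_neg this, if_pos (by omega)]
        rw [List.getElem_append_left (by simpa using hit)]
        simp
      · rw [if_pos (by omega)]
        rw [List.getElem_append_right (by simpa using hit)]
        simp
    · rw [foldl_set_length]; exact hiL
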